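-- pv_equiv track=rewrite | github.com/Ashiq-am/Path-of-Python | 3.Data Types/Arrays Set 1 and Set 2/Prefix/Find Array formed by reversing Prefix each time given character is found/Find Array formed by reversing Prefix each time given character is found.py | findFinalString
-- ===== SOURCE A (Python) =====
-- def findFinalString(arr, n, ch):
--     li = []
--     found = 0
--     for i in range(n):
--
--         # ch found
--         if arr[i] == ch:
--             found = 1 - found
--
--         # Push character at front of list
--         if found:
--             li.insert(0, arr[i])
--         # Push character at back of list
--         else:
--             li.append(arr[i])
--
--     # If there is odd number of ch
--     if found == 1:
--         li = li[::-1]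
--
--     # Return the list
--     return li
-- ===== SOURCE B (Python) =====
-- def findFinalString(arr, n, ch):
--     prefix = [arr[i] for i in range(n)]
--     # split prefix into segments: segs[0] before the first ch, segs[k>=1] starts with the k-th ch
--     segs = [[]]
--     for x in prefix:
--         if x == ch:
--             segs.append([x])
--         else:
--             segs[-1].append(x)
--     # odd-indexed segments were pushed to the front (so they come out reversed), even-indexed to the back
--     res = [y for seg in reversed(segs[1::2]) for y in reversed(seg)]
--     for seg in segs[::2]:
--         res += seg
--     # odd number of ch occurrences <=> even number of segments
--     if len(segs) % 2 == 0:
--         res.reverse()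
--     return res
-- ===== Notes on version B (the rewrite author's own statement) =====
-- stated objective: alternative
-- what changed: B drops A's per-element toggle/front-insertion loop entirely: it splits the prefix into segments at each occurrence of ch, then assembles the result from the odd-indexed segments (reversed segment-wise and in reverse segment order) followed by the even-indexed segments, with one final reverse when the segment count is even.
import Mathlib
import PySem

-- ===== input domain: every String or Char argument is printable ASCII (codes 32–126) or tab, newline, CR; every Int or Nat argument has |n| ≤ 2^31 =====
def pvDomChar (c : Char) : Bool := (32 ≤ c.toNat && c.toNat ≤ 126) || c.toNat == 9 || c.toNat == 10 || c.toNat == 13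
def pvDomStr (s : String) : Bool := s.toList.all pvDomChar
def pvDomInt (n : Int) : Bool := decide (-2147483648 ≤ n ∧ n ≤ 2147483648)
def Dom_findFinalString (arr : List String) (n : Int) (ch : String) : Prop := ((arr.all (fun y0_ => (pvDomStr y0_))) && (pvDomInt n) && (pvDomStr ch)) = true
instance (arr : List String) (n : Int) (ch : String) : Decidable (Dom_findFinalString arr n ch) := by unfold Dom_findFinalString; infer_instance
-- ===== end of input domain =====

-- B replaces A's per-element toggle/insert(0) loop by splitting the prefix into segments at each ch and
-- assembling the result from odd-/even-indexed segments (alternative decomposition; return values are equal).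

-- ===== PORT A =====
-- One loop step of A on the current element x: toggle `found` when x==ch, then prepend or append.
def stepA (ch : String) (st : List String × Int) (x : String) : List String × Int :=
  let f := if x = ch then 1 - st.2 else st.2
  if f ≠ 0 then (x :: st.1, f) else (st.1 ++ [x], f)

def findFinalString (arr : List String) (n : Int) (ch : String) : List String :=
  let st := (PySem.List.pyRange 0 n 1).foldl
    (fun st i => stepA ch st ((PySem.List.pyGet? arr i).getD "")) ([], 0)
  if st.2 = 1 then st.1.reverse else st.1

-- ===== PORT B =====
-- One loop step of B: start a new segment on x==ch, else grow the last segment (segs is never empty).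
def stepSeg (ch : String) (segs : List (List String)) (x : String) : List (List String) :=
  if x = ch then segs ++ [[x]] else segs.dropLast ++ [(segs.getLast?.getD []) ++ [x]]

-- hand port of the extended slices segs[1::2] / segs[::2] (every other element); exact for step 2
def everyOther : List (List String) → List (List String)
  | [] => []
  | [s] => [s]
  | s :: _ :: t => s :: everyOther t

def findFinalString_alt (arr : List String) (n : Int) (ch : String) : List String :=
  let pre := (PySem.List.pyRange 0 n 1).map (fun i => (PySem.List.pyGet? arr i).getD "")
  let segs := pre.foldl (stepSeg ch) [[]]
  let res := ((everyOther (segs.drop 1)).reverse.map List.reverse).flatten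
  let res := (everyOther segs).foldl (fun r s => r ++ s) res
  if (segs.length : Int) % 2 = 0 then res.reverse else res

-- ===== PRECONDITION & SPEC =====
-- Pre_ excludes exactly the inputs where the Python A raises IndexError (some index i < n beyond arr).
def Pre_findFinalString (arr : List String) (n : Int) (ch : String) : Prop := n ≤ (arr.length : Int)
instance (arr : List String) (n : Int) (ch : String) : Decidable (Pre_findFinalString arr n ch) := by unfold Pre_findFinalString; infer_instance
def pvWitness_findFinalString : List String × Int × String := (["a", "b", "a"], 3, "b")
def Spec_findFinalString (arr : List String) (n : Int) (ch : String) (out : List String) : Prop := out = findFinalString_alt arr n ch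
instance (arr : List String) (n : Int) (ch : String) (out : List String) : Decidable (Spec_findFinalString arr n ch out) := by unfold Spec_findFinalString; infer_instance

-- ===== CLAIM (what is proved, stated in full; the proofs are below) =====
def Claim_equal_findFinalString : Prop := ∀ (arr : List String) (n : Int) (ch : String), Dom_findFinalString arr n ch → Pre_findFinalString arr n ch → Spec_findFinalString arr n ch (findFinalString arr n ch)

-- ===== LEMMAS AND PROOFS =====

-- altB true l / altB false l: concatenation of the even- / odd-indexed elements of l.
def altB (b : Bool) : List (List String) → List String
  | [] => []
  | s :: t => (if b then s else []) ++ altB (!b) t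

-- whether altB b collects the element at index i: b for even i, !b for odd i
def taken (b : Bool) (i : Nat) : Bool := if i % 2 = 0 then b else !b

theorem taken_not_succ (b : Bool) (i : Nat) : taken (!b) i = taken b (i + 1) := by
  unfold taken
  rcases Nat.even_or_odd i with h | h
  · have h0 : i % 2 = 0 := Nat.even_iff.mp h
    have h1 : (i + 1) % 2 = 1 := by omega
    simp [h0, h1]
  · have h0 : i % 2 = 1 := Nat.odd_iff.mp h
    have h1 : (i + 1) % 2 = 0 := by omega
    simp [h0, h1]

theorem altB_append_singleton (b : Bool) (l : List (List String)) (s : List String) :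
    altB b (l ++ [s]) = altB b l ++ (if taken b l.length then s else []) := by
  induction l generalizing b with
  | nil => cases b <;> simp [altB, taken]
  | cons a t ih =>
    simp [List.cons_append, altB, ih (!b), taken_not_succ, List.append_assoc]

theorem everyOther_cons (s : List String) (t : List (List String)) :
    everyOther (s :: t) = s :: everyOther (t.drop 1) := by
  cases t <;> simp [everyOther]

theorem altB_eq_everyOther (l : List (List String)) :
    altB true l = (everyOther l).flatten ∧ altB false l = (everyOther (l.drop 1)).flatten := by
  induction l with
  | nil => simp [altB, everyOther]
  | cons s t ih =>
    constructor
    · simp [altB, ih.2, everyOther_cons]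
    · simpa [altB] using ih.1

-- the value A holds when B's segment state is `segs`
def interp (segs : List (List String)) : List String :=
  (altB false segs).reverse ++ altB true segs

-- A's flag when B's segment state is `segs`
def flagOf (segs : List (List String)) : Int :=
  if segs.length % 2 = 0 then 1 else 0

theorem seg_step (ch : String) (segs : List (List String)) (hne : segs ≠ []) (x : String) :
    stepA ch (interp segs, flagOf segs) x
      = (interp (stepSeg ch segs x), flagOf (stepSeg ch segs x))
    ∧ stepSeg ch segs x ≠ [] := by
  rcases List.eq_nil_or_concat segs with rfl | ⟨M, s, rfl⟩
  · exact absurd rfl hne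
  rw [List.concat_eq_append]
  have hL : (M ++ [s]).length = M.length + 1 := by simp
  by_cases hx : x = ch
  · -- x == ch: a new segment [x] is appended at index M.length + 1
    have hseg : stepSeg ch (M ++ [s]) x = (M ++ [s]) ++ [[x]] := by simp [stepSeg, hx]
    refine ⟨?_, by simp [hseg]⟩
    by_cases hM : M.length % 2 = 0
    · -- old flag 0, new flag 1: A prepends x; in B the new segment has odd index (front side)
      have e1 : (M.length + 1) % 2 = 1 := by omega
      have hf : flagOf (M ++ [s]) = 0 := by simp [flagOf, hL, e1]
      have hf' : flagOf ((M ++ [s]) ++ [[x]]) = 1 := by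
        simp [flagOf, hM]
      have hF : altB false ((M ++ [s]) ++ [[x]]) = altB false (M ++ [s]) ++ [x] := by
        rw [altB_append_singleton]; simp [taken, hL, e1]
      have hT : altB true ((M ++ [s]) ++ [[x]]) = altB true (M ++ [s]) := by
        rw [altB_append_singleton]; simp [taken, hL, e1]
      rw [hseg, hf, hf']
      have hA : stepA ch (interp (M ++ [s]), (0 : Int)) x = (x :: interp (M ++ [s]), 1) := by
        simp [stepA, hx]
      rw [hA]; unfold interp; rw [hF, hT]; simp
    · -- old flag 1, new flag 0: A appends x; the new segment has even index (back side)
      have e1 : (M.length + 1) % 2 = 0 := by omega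
      have hf : flagOf (M ++ [s]) = 1 := by simp [flagOf, hL, e1]
      have hf' : flagOf ((M ++ [s]) ++ [[x]]) = 0 := by
        simp [flagOf, hM]
      have hF : altB false ((M ++ [s]) ++ [[x]]) = altB false (M ++ [s]) := by
        rw [altB_append_singleton]; simp [taken, hL, e1]
      have hT : altB true ((M ++ [s]) ++ [[x]]) = altB true (M ++ [s]) ++ [x] := by
        rw [altB_append_singleton]; simp [taken, hL, e1]
      rw [hseg, hf, hf']
      have hA : stepA ch (interp (M ++ [s]), (1 : Int)) x = (interp (M ++ [s]) ++ [x], 0) := by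
        simp [stepA, hx]
      rw [hA]; unfold interp; rw [hF, hT]; simp
  · -- x != ch: the last segment (index M.length) grows; flag and length parity unchanged
    have hseg : stepSeg ch (M ++ [s]) x = M ++ [s ++ [x]] := by
      simp [stepSeg, hx]
    refine ⟨?_, by simp [hseg]⟩
    have hL' : (M ++ [s ++ [x]]).length = M.length + 1 := by simp
    by_cases hM : M.length % 2 = 0
    · -- flag 0: A appends; the last segment has even index (back side)
      have e1 : (M.length + 1) % 2 = 1 := by omega
      have hf : flagOf (M ++ [s]) = 0 := by simp [flagOf, hL, e1]
      have hf' : flagOf (M ++ [s ++ [x]]) = 0 := by simp [flagOf, hL', e1]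
      have hF : altB false (M ++ [s]) = altB false M := by
        rw [altB_append_singleton]; simp [taken, hM]
      have hF' : altB false (M ++ [s ++ [x]]) = altB false M := by
        rw [altB_append_singleton]; simp [taken, hM]
      have hT : altB true (M ++ [s]) = altB true M ++ s := by
        rw [altB_append_singleton]; simp [taken, hM]
      have hT' : altB true (M ++ [s ++ [x]]) = altB true M ++ (s ++ [x]) := by
        rw [altB_append_singleton]; simp [taken, hM]
      rw [hseg, hf, hf']
      have hA : stepA ch (interp (M ++ [s]), (0 : Int)) x = (interp (M ++ [s]) ++ [x], 0) := by
        simp [stepA, hx]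
      rw [hA]; unfold interp; rw [hF, hF', hT, hT']; simp
    · -- flag 1: A prepends; the last segment has odd index (front side)
      have e1 : (M.length + 1) % 2 = 0 := by omega
      have hf : flagOf (M ++ [s]) = 1 := by simp [flagOf, hL, e1]
      have hf' : flagOf (M ++ [s ++ [x]]) = 1 := by simp [flagOf, hL', e1]
      have hF : altB false (M ++ [s]) = altB false M ++ s := by
        rw [altB_append_singleton]; simp [taken, hM]
      have hF' : altB false (M ++ [s ++ [x]]) = altB false M ++ (s ++ [x]) := by
        rw [altB_append_singleton]; simp [taken, hM]
      have hT : altB true (M ++ [s]) = altB true M := by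
        rw [altB_append_singleton]; simp [taken, hM]
      have hT' : altB true (M ++ [s ++ [x]]) = altB true M := by
        rw [altB_append_singleton]; simp [taken, hM]
      rw [hseg, hf, hf']
      have hA : stepA ch (interp (M ++ [s]), (1 : Int)) x = (x :: interp (M ++ [s]), 1) := by
        simp [stepA, hx]
      rw [hA]; unfold interp; rw [hF, hF', hT, hT']
      simp [List.reverse_append, List.append_assoc]

theorem seg_fold (ch : String) (p : List String) :
    ∀ (segs : List (List String)), segs ≠ [] →
      p.foldl (stepA ch) (interp segs, flagOf segs)
        = (interp (p.foldl (stepSeg ch) segs), flagOf (p.foldl (stepSeg ch) segs))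
      ∧ p.foldl (stepSeg ch) segs ≠ [] := by
  induction p with
  | nil => intro segs hne; exact ⟨rfl, hne⟩
  | cons x t ih =>
    intro segs hne
    obtain ⟨hstep, hne'⟩ := seg_step ch segs hne x
    simpa [List.foldl_cons, hstep] using ih (stepSeg ch segs x) hne'

theorem foldl_append_eq_flatten (res : List String) (l : List (List String)) :
    l.foldl (fun r s => r ++ s) res = res ++ l.flatten := by
  induction l generalizing res with
  | nil => simp
  | cons s t ih => simp [List.foldl_cons, ih, List.append_assoc]

-- ===== VERDICT (by name: the statement is the Claim_ definition above) =====
theorem findFinalString_spec : Claim_equal_findFinalString := by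
  intro arr n ch _ _
  unfold Spec_findFinalString findFinalString findFinalString_alt
  set p := (PySem.List.pyRange 0 n 1).map (fun i => (PySem.List.pyGet? arr i).getD "") with hp
  have hmap : (PySem.List.pyRange 0 n 1).foldl
      (fun st i => stepA ch st ((PySem.List.pyGet? arr i).getD "")) ([], 0)
      = p.foldl (stepA ch) ([], 0) := by
    rw [hp, List.foldl_map]
  have hinit1 : interp [[]] = ([] : List String) := by simp [interp, altB]
  have hinit2 : flagOf [[]] = 0 := by simp [flagOf]
  obtain ⟨hfold, hne⟩ := seg_fold ch p [[]] (by simp)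
  rw [hinit1, hinit2] at hfold
  set segs := p.foldl (stepSeg ch) [[]] with hsegs
  rw [hmap, hfold]
  have hflat : ((everyOther (segs.drop 1)).reverse.map List.reverse).flatten
      = (altB false segs).reverse := by
    rw [(altB_eq_everyOther segs).2]
    simp [List.reverse_flatten]
  have hres : (everyOther segs).foldl (fun r s => r ++ s)
        (((everyOther (segs.drop 1)).reverse.map List.reverse).flatten)
      = interp segs := by
    rw [foldl_append_eq_flatten, hflat, ← (altB_eq_everyOther segs).1]; rfl
  simp only []
  rw [hres, show (List.foldl (stepSeg ch) [[]] p) = segs from hsegs.symm]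
  by_cases hlen : segs.length % 2 = 0
  · have h2 : ((segs.length : Int)) % 2 = 0 := by omega
    simp [flagOf, hlen, h2]
  · have h2 : ¬ ((segs.length : Int) % 2 = 0) := by omega
    simp [flagOf, hlen, h2]
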